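-- pv_equiv track=rewrite | github.com/qscwzby7t6-svg/novel-rewriter | backend/services/parser.py | _find_chapters_by_keywords
-- ===== SOURCE A (Python) =====
-- def _find_chapters_by_keywords(chapters: list[dict], keywords: list[str], max_results: int = 30) -> list[dict]:
--     scored = []
--     for ch in chapters:
--         text = ch.get("title", "") + " " + ch.get("content", "")
--         score = sum(1 for kw in keywords if kw in text)
--         if score > 0:
--             scored.append((score, ch))
--     scored.sort(key=lambda x: x[0], reverse=True)
--     return [ch for _, ch in scored[:max_results]]
-- ===== SOURCE B (Python) =====
-- def _find_chapters_by_keywords(chapters: list[dict], keywords: list[str], max_results: int = 30) -> list[dict]: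
--     buckets = [[] for _ in range(len(keywords) + 1)]
--     for ch in chapters:
--         text = ch.get("title", "") + " " + ch.get("content", "")
--         score = sum(1 for kw in keywords if kw in text)
--         if score > 0:
--             buckets[score].append(ch)
--     result = []
--     for s in range(len(keywords), 0, -1):
--         result.extend(buckets[s])
--     return result[:max_results]
-- ===== Notes on version B (the rewrite author's own statement) =====
-- stated objective: alternative
-- what changed: Replaces the build-pairs-then-stable-reverse-sort pipeline by a counting/bucket sort: qualifying chapters are appended to a bucket per score and the buckets are emitted from highest score to lowest, reproducing the stable tie order without any comparison sort.
import Mathlib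
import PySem

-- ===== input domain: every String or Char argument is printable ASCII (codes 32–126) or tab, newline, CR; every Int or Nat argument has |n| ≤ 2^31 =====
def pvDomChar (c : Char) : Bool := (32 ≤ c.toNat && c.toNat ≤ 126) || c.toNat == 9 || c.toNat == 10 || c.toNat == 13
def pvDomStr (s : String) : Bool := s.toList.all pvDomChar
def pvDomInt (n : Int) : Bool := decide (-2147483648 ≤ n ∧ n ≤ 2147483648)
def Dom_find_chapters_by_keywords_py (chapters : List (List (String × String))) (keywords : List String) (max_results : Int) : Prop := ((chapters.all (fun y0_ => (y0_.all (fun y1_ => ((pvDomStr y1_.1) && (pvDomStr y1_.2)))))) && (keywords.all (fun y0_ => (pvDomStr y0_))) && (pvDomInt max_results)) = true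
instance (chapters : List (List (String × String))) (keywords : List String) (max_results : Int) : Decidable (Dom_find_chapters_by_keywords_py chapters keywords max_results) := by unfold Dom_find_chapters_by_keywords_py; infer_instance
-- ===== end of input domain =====

-- B replaces A's build-pairs-then-stable-reverse-sort by a counting/bucket sort over scores
-- (append each qualifying chapter to its score's bucket, emit buckets from highest score to
-- lowest); an alternative of similar cost, proved to return the identical list.

-- shared scoring helpers: both Pythons compute text and score by the very same expressions
def pvText (ch : List (String × String)) : String :=
  PySem.Dict.getD ⟨ch⟩ "title" "" ++ " " ++ PySem.Dict.getD ⟨ch⟩ "content" ""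

def pvScore (keywords : List String) (ch : List (String × String)) : Int :=
  keywords.foldl (fun s kw => if PySem.Str.isIn kw (pvText ch) then s + 1 else s) 0

-- ===== PORT A =====
def find_chapters_by_keywords_py (chapters : List (List (String × String))) (keywords : List String) (max_results : Int) : List (List (String × String)) :=
  let scored := chapters.foldl (fun acc ch =>
    if 0 < pvScore keywords ch then acc ++ [(pvScore keywords ch, ch)] else acc) []
  let sortedScored := PySem.List.sorted scored (fun x => x.1) true
  (PySem.List.slice sortedScored none (some max_results)).map (fun x => x.2)

-- ===== PORT B =====
def find_chapters_by_keywords_py_alt (chapters : List (List (String × String))) (keywords : List String) (max_results : Int) : List (List (String × String)) :=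
  let buckets := chapters.foldl (fun bks ch =>
      if 0 < pvScore keywords ch then bks.modify (pvScore keywords ch).toNat (· ++ [ch]) else bks)
    (List.replicate (keywords.length + 1) [])
  -- buckets[s] for s in range(len(keywords), 0, -1): s is always in range (1 ≤ s ≤ len(keywords)
  -- < len(buckets)), so the .getD [] default of the exact pyGet? never fires
  let result := (PySem.List.pyRange (keywords.length : Int) 0 (-1)).foldl
      (fun acc s => acc ++ (PySem.List.pyGet? buckets s).getD []) []
  PySem.List.slice result none (some max_results)

-- ===== PRECONDITION & SPEC =====
def Spec_find_chapters_by_keywords_py (chapters : List (List (String × String))) (keywords : List String) (max_results : Int) (out : List (List (String × String))) : Prop := out = find_chapters_by_keywords_py_alt chapters keywords max_results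
instance (chapters : List (List (String × String))) (keywords : List String) (max_results : Int) (out : List (List (String × String))) : Decidable (Spec_find_chapters_by_keywords_py chapters keywords max_results out) := by unfold Spec_find_chapters_by_keywords_py; infer_instance

-- ===== CLAIM (what is proved, stated in full; the proofs are below) =====
def Claim_equal_find_chapters_by_keywords_py : Prop := ∀ (chapters : List (List (String × String))) (keywords : List String) (max_results : Int), Dom_find_chapters_by_keywords_py chapters keywords max_results → Spec_find_chapters_by_keywords_py chapters keywords max_results (find_chapters_by_keywords_py chapters keywords max_results)

-- ===== LEMMAS AND PROOFS =====

theorem pvScore_eq_countP (keywords : List String) (ch : List (String × String)) :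
    pvScore keywords ch = (keywords.countP (fun kw => PySem.Str.isIn kw (pvText ch)) : Int) := by
  unfold pvScore
  have := PySem.List.foldl_if_add_one (fun kw => PySem.Str.isIn kw (pvText ch)) keywords 0
  simpa using this

theorem pvScore_le (keywords : List String) (ch : List (String × String)) :
    pvScore keywords ch ≤ (keywords.length : Int) := by
  rw [pvScore_eq_countP]
  exact_mod_cast List.countP_le_length ..

theorem insertBy_cons {α : Type} (b : α → α → Bool) (x y : α) (ys : List α) :
    PySem.List.insertBy b x (y :: ys)
      = if b x y then x :: y :: ys else y :: PySem.List.insertBy b x ys := by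
  simp [PySem.List.insertBy]

theorem insertBy_append_not_before {α : Type} (b : α → α → Bool) (x : α) (B R : List α)
    (h : ∀ y ∈ B, b x y = false) :
    PySem.List.insertBy b x (B ++ R) = B ++ PySem.List.insertBy b x R := by
  induction B with
  | nil => simp
  | cons y B ih =>
    rw [List.cons_append, insertBy_cons, if_neg (by simp [h y (by simp)]), ih]
    · simp
    · exact fun z hz => h z (by simp [hz])

theorem insertBy_eq_cons_of_before {α : Type} (b : α → α → Bool) (x : α) (R : List α)
    (h : ∀ y ∈ R, b x y = true) :
    PySem.List.insertBy b x R = x :: R := by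
  cases R with
  | nil => simp [PySem.List.insertBy]
  | cons y R => rw [insertBy_cons, if_pos (h y (by simp))]

-- the key step: inserting x into the bucket decomposition of ys gives the decomposition of ys ++ [x]
theorem insertBy_concat_buckets {α : Type} (vals : List Int) (x : Int × α) (ys : List (Int × α))
    (hv : vals.Pairwise (· > ·)) (hx : x.1 ∈ vals) :
    PySem.List.insertBy (fun a b => decide (b.1 < a.1)) x
        (vals.flatMap (fun v => ys.filter (fun p => p.1 == v)))
      = vals.flatMap (fun v => (ys ++ [x]).filter (fun p => p.1 == v)) := by
  induction vals with
  | nil => simp at hx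
  | cons v vs ih =>
    have hgt : ∀ w ∈ vs, w < v := fun w hw => (List.pairwise_cons.mp hv).1 w hw
    simp only [List.flatMap_cons]
    by_cases hxv : x.1 = v
    · -- x belongs to the head bucket: skip the bucket (equal keys), insert before the rest
      have hB : ∀ y ∈ ys.filter (fun p => p.1 == v), (fun a b => decide (b.1 < a.1)) x y = false := by
        intro y hy
        have : y.1 = v := by simpa using (List.of_mem_filter hy)
        simp [this, hxv]
      rw [insertBy_append_not_before _ _ _ _ hB]
      have hR : ∀ y ∈ vs.flatMap (fun w => ys.filter (fun p => p.1 == w)),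
          (fun a b => decide (b.1 < a.1)) x y = true := by
        intro y hy
        obtain ⟨w, hw, hyw⟩ := List.mem_flatMap.mp hy
        have h1 : y.1 = w := by simpa using (List.of_mem_filter hyw)
        simp [h1, hxv]
        exact hgt w hw
      rw [insertBy_eq_cons_of_before _ _ _ hR]
      have htail : vs.flatMap (fun w => (ys ++ [x]).filter (fun p => p.1 == w))
          = vs.flatMap (fun w => ys.filter (fun p => p.1 == w)) := by
        apply List.flatMap_congr
        intro w hw
        have : (x.1 == w) = false := by
          have := hgt w hw; simp [hxv]; omega
        simp [List.filter_append, this]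
      rw [htail]
      have hhead : (ys ++ [x]).filter (fun p => p.1 == v)
          = ys.filter (fun p => p.1 == v) ++ [x] := by
        simp [List.filter_append, hxv]
      rw [hhead]
      simp
    · -- x belongs to a deeper bucket: skip the head bucket entirely
      have hx' : x.1 ∈ vs := by
        rcases List.mem_cons.mp hx with h | h
        · exact absurd h hxv
        · exact h
      have hB : ∀ y ∈ ys.filter (fun p => p.1 == v), (fun a b => decide (b.1 < a.1)) x y = false := by
        intro y hy
        have h1 : y.1 = v := by simpa using (List.of_mem_filter hy)
        have h2 : x.1 < v := hgt _ hx'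
        simp [h1]; omega
      rw [insertBy_append_not_before _ _ _ _ hB,
        ih (List.pairwise_cons.mp hv).2 hx']
      have hhead : (ys ++ [x]).filter (fun p => p.1 == v)
          = ys.filter (fun p => p.1 == v) := by
        have : (x.1 == v) = false := by simp [hxv]
        simp [List.filter_append, this]
      rw [hhead]

-- Python's stable reverse sort by an Int key is the bucket concatenation over any strictly
-- decreasing value list covering all keys
theorem sorted_rev_eq_buckets {α : Type} (xs : List (Int × α)) (vals : List Int)
    (hv : vals.Pairwise (· > ·)) (hx : ∀ p ∈ xs, p.1 ∈ vals) :
    PySem.List.sorted xs (fun p => p.1) true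
      = vals.flatMap (fun v => xs.filter (fun p => p.1 == v)) := by
  rw [PySem.List.sorted_rev_eq_foldl_insertBy]
  induction xs using List.reverseRecOn with
  | nil => simp
  | append_singleton ys x ih =>
    rw [List.foldl_append, List.foldl_cons, List.foldl_nil,
      ih (fun p hp => hx p (by simp [hp]))]
    exact insertBy_concat_buckets vals x ys hv (hx x (by simp))

-- B's bucket array, read back at index i
theorem buckets_getElem? (keywords : List String) (chapters : List (List (String × String)))
    (init : List (List (List (String × String)))) (i : Nat)
    (hlen : ∀ ch ∈ chapters, (pvScore keywords ch).toNat < init.length) :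
    (chapters.foldl (fun bks ch =>
        if 0 < pvScore keywords ch then bks.modify (pvScore keywords ch).toNat (· ++ [ch]) else bks)
        init)[i]?
      = init[i]?.map (fun b => b ++ chapters.filter
          (fun ch => decide (0 < pvScore keywords ch) && ((pvScore keywords ch).toNat == i))) := by
  induction chapters generalizing init with
  | nil => simp
  | cons ch t ih =>
    simp only [List.foldl_cons, List.filter_cons]
    by_cases h : 0 < pvScore keywords ch
    · rw [if_pos h, ih _ (fun c hc => by rw [List.length_modify]; exact hlen c (by simp [hc]))]
      rw [List.getElem?_modify]
      by_cases hj : (pvScore keywords ch).toNat = i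
      · have hi : i < init.length := hj ▸ hlen ch (by simp)
        simp [hj, h, List.getElem?_eq_getElem hi]
      · simp [hj, h]
    · rw [if_neg h, ih _ (fun c hc => hlen c (by simp [hc]))]
      simp [h]

theorem map_slice_to {α β : Type} (f : α → β) (xs : List α) (m : Int) :
    (PySem.List.slice xs none (some m)).map f = PySem.List.slice (xs.map f) none (some m) := by
  simp [PySem.List.slice, List.map_take]

-- ===== VERDICT (by name: the statement is the Claim_ definition above) =====
theorem find_chapters_by_keywords_py_spec : Claim_equal_find_chapters_by_keywords_py := by
  intro chapters keywords max_results _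
  unfold Spec_find_chapters_by_keywords_py
  unfold find_chapters_by_keywords_py find_chapters_by_keywords_py_alt
  set n := keywords.length with hn
  set sc := pvScore keywords with hsc
  -- A's scored list in closed form
  rw [PySem.List.foldl_append_ite (fun ch => 0 < sc ch) (fun ch => (sc ch, ch)) chapters []]
  rw [List.nil_append]
  set good := chapters.filter (fun ch => decide (0 < sc ch)) with hgood
  set scored := good.map (fun ch => (sc ch, ch)) with hscored
  -- the descending value list [n, n-1, …, 1]
  rw [PySem.List.pyRange_neg_one]
  simp only [Int.sub_zero, Int.toNat_natCast]
  have hvp : (((List.range n).map (fun (k : Nat) => (n : Int) - (k : Int))).Pairwise (· > ·)) := by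
    rw [List.pairwise_map]
    exact List.pairwise_lt_range.imp (fun hab => by omega)
  have hscmem : ∀ p ∈ scored, p.1 ∈ (List.range n).map (fun (k : Nat) => (n : Int) - (k : Int)) := by
    intro p hp
    rw [hscored] at hp
    obtain ⟨ch, hch, rfl⟩ := List.mem_map.mp hp
    have h1 : 0 < sc ch := by
      rw [hgood] at hch
      simpa using (List.of_mem_filter hch)
    have h2 : sc ch ≤ (n : Int) := pvScore_le keywords ch
    have h3 : (sc ch).toNat ≤ n := by omega
    have h4 : n - (sc ch).toNat < n := by omega
    have h5 : (n : Int) - ((n - (sc ch).toNat : Nat) : Int) = sc ch := by omega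
    exact List.mem_map.mpr ⟨n - (sc ch).toNat, List.mem_range.mpr h4, h5⟩
  -- A = bucket concatenation
  rw [sorted_rev_eq_buckets scored _ hvp hscmem]
  -- B's result list
  rw [PySem.List.foldl_append_eq_flatMap, List.nil_append]
  rw [map_slice_to, List.map_flatMap]
  congr 1
  apply List.flatMap_congr
  intro v hv
  -- v = n - k is a Nat in [1, n]
  obtain ⟨k, hk, rfl⟩ := List.mem_map.mp hv
  have hk' : k < n := List.mem_range.mp hk
  have hcast : ((n - k : Nat) : Int) = (n : Int) - (k : Int) := by omega
  rw [← hcast, PySem.List.pyGet?_natCast]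
  rw [buckets_getElem? keywords chapters _ _
    (fun ch hch => by
      rw [List.length_replicate]
      have := pvScore_le keywords ch
      omega)]
  rw [List.getElem?_replicate]
  rw [if_pos (by omega)]
  simp only [Option.map_some, Option.getD_some, List.nil_append]
  -- both buckets are the same chapter filter
  rw [hscored, List.filter_map]
  rw [List.map_map]
  have hid : (fun x => x.2) ∘ (fun ch => (sc ch, ch)) = id := rfl
  rw [hid, List.map_id]
  rw [hgood, List.filter_filter]
  apply List.filter_congr
  intro ch _
  have hle : sc ch ≤ (n : Int) := pvScore_le keywords ch
  simp only [Function.comp, ← hsc]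
  by_cases h0 : 0 < sc ch
  · by_cases he : sc ch = (n : Int) - (k : Int)
    · simp [he]
      omega
    · simp [h0]
      omega
  · simp [h0]
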